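-- pv_equiv track=rewrite | github.com/TheKingHippopotamus/HippoResearch_Marketbeat | tools/entity_analyzer.py | _categorize_phrase
-- ===== SOURCE A (Python) =====
-- def _categorize_phrase(phrase: str) -> str:
--     """Categorize a phrase based on content"""
--     phrase_lower = phrase.lower()
--
--     if any(word in phrase_lower for word in ['earnings', 'revenue', 'profit', 'loss']):
--         return 'financial_metric'
--     elif any(word in phrase_lower for word in ['stock', 'share', 'market']):
--         return 'market_term'
--     elif any(word in phrase_lower for word in ['growth', 'decline', 'increase', 'decrease']):
--         return 'trend'
--     elif any(word in phrase_lower for word in ['quarter', 'year', 'month']):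
--         return 'temporal'
--     else:
--         return 'general'
-- ===== SOURCE B (Python) =====
-- _KEYWORDS = [
--     ('earnings', 0), ('revenue', 0), ('profit', 0), ('loss', 0),
--     ('stock', 1), ('share', 1), ('market', 1),
--     ('growth', 2), ('decline', 2), ('increase', 2), ('decrease', 2),
--     ('quarter', 3), ('year', 3), ('month', 3),
-- ]
-- _NAMES = ['financial_metric', 'market_term', 'trend', 'temporal', 'general']
--
--
-- def _priority_at(pl, i):
--     """Priority of the best (lowest-numbered) keyword starting at position i, or 4."""
--     for kw, pr in _KEYWORDS:
--         if pl[i:i + len(kw)] == kw: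
--             return pr
--     return 4
--
--
-- def _categorize_phrase(phrase: str) -> str:
--     # Single left-to-right scan over the lowercased phrase keeping a running
--     # minimum of the priorities of keywords that start at each position.
--     pl = phrase.lower()
--     best = 4
--     for i in range(len(pl)):
--         p = _priority_at(pl, i)
--         if p < best:
--             best = p
--     return _NAMES[best]
-- ===== Notes on version B (the rewrite author's own statement) =====
-- stated objective: alternative
-- what changed: Instead of four priority-ordered any(word in phrase_lower) membership tests with early return, B makes one left-to-right scan over the lowercased phrase, at each position computing the priority of any keyword starting there and keeping a running minimum, then maps the final minimum to its category name.
import Mathlib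
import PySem

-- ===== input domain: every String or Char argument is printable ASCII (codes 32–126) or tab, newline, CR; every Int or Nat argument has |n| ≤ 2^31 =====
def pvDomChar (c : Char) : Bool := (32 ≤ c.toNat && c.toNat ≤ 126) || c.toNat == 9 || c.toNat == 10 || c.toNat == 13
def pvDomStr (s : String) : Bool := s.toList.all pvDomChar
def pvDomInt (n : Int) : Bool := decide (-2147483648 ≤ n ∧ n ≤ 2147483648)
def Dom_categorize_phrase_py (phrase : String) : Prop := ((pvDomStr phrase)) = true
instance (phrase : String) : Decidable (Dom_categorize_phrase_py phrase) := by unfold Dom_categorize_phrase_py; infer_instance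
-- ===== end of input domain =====

-- B replaces A's four priority-ordered whole-string membership tests by a single positional
-- scan with a running minimum priority; objective: alternative (same complexity).

-- ===== PORT A =====
def categorize_phrase_py (phrase : String) : String :=
  let phrase_lower := PySem.Str.lower phrase
  if ["earnings", "revenue", "profit", "loss"].any (fun w => PySem.Str.isIn w phrase_lower) then
    "financial_metric"
  else if ["stock", "share", "market"].any (fun w => PySem.Str.isIn w phrase_lower) then
    "market_term"
  else if ["growth", "decline", "increase", "decrease"].any (fun w => PySem.Str.isIn w phrase_lower) then
    "trend"
  else if ["quarter", "year", "month"].any (fun w => PySem.Str.isIn w phrase_lower) then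
    "temporal"
  else
    "general"

-- ===== PORT B =====
def pvKEYWORDS : List (String × Nat) :=
  [("earnings", 0), ("revenue", 0), ("profit", 0), ("loss", 0),
   ("stock", 1), ("share", 1), ("market", 1),
   ("growth", 2), ("decline", 2), ("increase", 2), ("decrease", 2),
   ("quarter", 3), ("year", 3), ("month", 3)]

def pvNAMES : List String := ["financial_metric", "market_term", "trend", "temporal", "general"]

-- the 'for kw, pr in _KEYWORDS: if pl[i:i+len(kw)] == kw: return pr' loop of _priority_at
def pvPrioLoop (pl : List Char) (i : Nat) : List (String × Nat) → Nat
  | [] => 4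
  | (kw, pr) :: rest =>
      if PySem.List.slice pl (some (i : Int)) (some ((i : Int) + (kw.toList.length : Int))) == kw.toList
      then pr else pvPrioLoop pl i rest

def pvPriorityAt (pl : List Char) (i : Nat) : Nat := pvPrioLoop pl i pvKEYWORDS

def categorize_phrase_py_alt (phrase : String) : String :=
  let pl := (PySem.Str.lower phrase).toList
  let best := (List.range pl.length).foldl
    (fun best i => let p := pvPriorityAt pl i; if p < best then p else best) 4
  -- _NAMES[best]; best ≤ 4 always, so the index is in range and .getD is never taken
  (PySem.List.pyGet? pvNAMES (best : Int)).getD ""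

-- ===== PRECONDITION & SPEC =====
def Spec_categorize_phrase_py (phrase : String) (out : String) : Prop := out = categorize_phrase_py_alt phrase
instance (phrase : String) (out : String) : Decidable (Spec_categorize_phrase_py phrase out) := by unfold Spec_categorize_phrase_py; infer_instance

-- ===== CLAIM (what is proved, stated in full; the proofs are below) =====
def Claim_equal_categorize_phrase_py : Prop := ∀ (phrase : String), Dom_categorize_phrase_py phrase → Spec_categorize_phrase_py phrase (categorize_phrase_py phrase)

-- ===== LEMMAS AND PROOFS =====

-- the slice test of _priority_at is a prefix test at position i
theorem pv_slice_cond (cs : List Char) (i : Nat) (kw : List Char) :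
    (PySem.List.slice cs (some (i : Int)) (some ((i : Int) + (kw.length : Int))) == kw) = true
      ↔ kw <+: cs.drop i := by
  rw [PySem.List.slice_natCast_add, beq_iff_eq, List.prefix_iff_eq_take]
  constructor <;> intro h <;> exact h.symm

-- a nonempty prefix of some suffix starts at a position inside the list
theorem pv_exists_pos (cs kw : List Char) (hkw : kw ≠ []) :
    (∃ i, i < cs.length ∧ kw <+: cs.drop i) ↔ PySem.Chars.isIn kw cs = true := by
  rw [← PySem.Chars.exists_prefix_drop_iff_isIn]
  constructor
  · rintro ⟨i, _, h⟩; exact ⟨i, h⟩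
  · rintro ⟨i, h⟩
    refine ⟨i, ?_, h⟩
    by_contra hge
    have : cs.drop i = [] := List.drop_eq_nil_of_le (by omega)
    rw [this] at h
    exact hkw (List.prefix_nil.mp h)

-- running-minimum fold characterisation
theorem pv_fold_le (f : Nat → Nat) (l : List Nat) (a j : Nat) :
    (l.foldl (fun b i => if f i < b then f i else b) a) ≤ j ↔ a ≤ j ∨ ∃ i ∈ l, f i ≤ j := by
  induction l generalizing a with
  | nil => simp
  | cons x t ih =>
      simp only [List.foldl_cons, ih, List.mem_cons]
      constructor
      · rintro (h | ⟨i, hi, hle⟩)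
        · split at h <;> [exact Or.inr ⟨x, Or.inl rfl, by omega⟩; exact Or.inl h]
        · exact Or.inr ⟨i, Or.inr hi, hle⟩
      · rintro (h | ⟨i, rfl | hi, hle⟩)
        · left; split <;> omega
        · left; split <;> omega
        · exact Or.inr ⟨i, hi, hle⟩

-- on a table whose priorities are nondecreasing, the first-match loop returns ≤ j
-- exactly when some entry of priority ≤ j matches at position i
theorem pv_prioLoop_le (pl : List Char) (i : Nat) (tbl : List (String × Nat)) (j : Nat)
    (hj : j < 4) (hmono : tbl.Pairwise (fun p q => p.2 ≤ q.2)) :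
    pvPrioLoop pl i tbl ≤ j ↔ ∃ p ∈ tbl, p.2 ≤ j ∧ p.1.toList <+: pl.drop i := by
  induction tbl with
  | nil => simp [pvPrioLoop]; omega
  | cons hd t ih =>
      obtain ⟨kw, pr⟩ := hd
      rw [List.pairwise_cons] at hmono
      by_cases hc : kw.toList <+: pl.drop i
      · simp only [pvPrioLoop, pv_slice_cond, hc, if_true, List.mem_cons]
        constructor
        · intro h; exact ⟨(kw, pr), Or.inl rfl, h, hc⟩
        · rintro ⟨p, rfl | hp, hle, _⟩
          · exact hle
          · exact le_trans (hmono.1 p hp) hle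
      · simp only [pvPrioLoop, pv_slice_cond, hc, if_false, ih hmono.2, List.mem_cons]
        constructor
        · rintro ⟨p, hp, hle, hpre⟩; exact ⟨p, Or.inr hp, hle, hpre⟩
        · rintro ⟨p, rfl | hp, hle, hpre⟩
          · exact absurd hpre hc
          · exact ⟨p, hp, hle, hpre⟩

theorem pv_kw_mono : pvKEYWORDS.Pairwise (fun p q => p.2 ≤ q.2) := by decide

theorem pv_kw_ne_nil : ∀ p ∈ pvKEYWORDS, p.1.toList ≠ [] := by decide

theorem pv_prio_le (cs : List Char) (i j : Nat) (hj : j < 4) :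
    pvPriorityAt cs i ≤ j ↔ ∃ p ∈ pvKEYWORDS, p.2 ≤ j ∧ p.1.toList <+: cs.drop i :=
  pv_prioLoop_le cs i pvKEYWORDS j hj pv_kw_mono

-- 'some keyword of priority j occurs in cs'
def pvG (cs : List Char) (j : Nat) : Prop :=
  ∃ p ∈ pvKEYWORDS, p.2 = j ∧ PySem.Chars.isIn p.1.toList cs = true

theorem pv_b_le (cs : List Char) (j : Nat) (hj : j < 4) :
    ((List.range cs.length).foldl
        (fun best i => if pvPriorityAt cs i < best then pvPriorityAt cs i else best) 4) ≤ j
      ↔ ∃ k ≤ j, pvG cs k := by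
  rw [pv_fold_le (fun i => pvPriorityAt cs i)]
  constructor
  · rintro (h | ⟨i, hi, hle⟩)
    · omega
    · rw [List.mem_range] at hi
      rcases (pv_prio_le cs i j hj).mp hle with ⟨p, hp, hple, hpre⟩
      exact ⟨p.2, hple, p, hp, rfl,
        (pv_exists_pos cs _ (pv_kw_ne_nil p hp)).mp ⟨i, hi, hpre⟩⟩
  · rintro ⟨k, hk, p, hp, hpk, hin⟩
    rcases (pv_exists_pos cs _ (pv_kw_ne_nil p hp)).mpr hin with ⟨i, hi, hpre⟩
    exact Or.inr ⟨i, List.mem_range.mpr hi,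
      (pv_prio_le cs i j hj).mpr ⟨p, hp, by omega, hpre⟩⟩

-- A's four membership tests are the four group-occurrence propositions
theorem pv_c0 (s : String) :
    (["earnings", "revenue", "profit", "loss"].any (fun w => PySem.Str.isIn w s)) = true
      ↔ pvG s.toList 0 := by
  simp only [pvG, pvKEYWORDS, List.any_cons, List.any_nil, Bool.or_eq_true, PySem.Str.isIn,
    List.mem_cons, List.not_mem_nil, or_false]
  constructor
  · rintro (h | h | h | h | h)
    · exact ⟨_, Or.inl rfl, rfl, h⟩
    · exact ⟨_, Or.inr (Or.inl rfl), rfl, h⟩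
    · exact ⟨_, Or.inr (Or.inr (Or.inl rfl)), rfl, h⟩
    · exact ⟨_, Or.inr (Or.inr (Or.inr (Or.inl rfl))), rfl, h⟩
    · exact absurd h (by simp)
  · rintro ⟨p, hp, hpr, hin⟩
    rcases hp with rfl | rfl | rfl | rfl | hp
    · exact Or.inl hin
    · exact Or.inr (Or.inl hin)
    · exact Or.inr (Or.inr (Or.inl hin))
    · exact Or.inr (Or.inr (Or.inr (Or.inl hin)))
    · rcases hp with rfl | rfl | rfl | rfl | rfl | rfl | rfl | rfl | rfl | rfl <;> simp_all

theorem pv_c1 (s : String) :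
    (["stock", "share", "market"].any (fun w => PySem.Str.isIn w s)) = true
      ↔ pvG s.toList 1 := by
  simp only [pvG, pvKEYWORDS, List.any_cons, List.any_nil, Bool.or_eq_true, PySem.Str.isIn,
    List.mem_cons, List.not_mem_nil, or_false]
  constructor
  · rintro (h | h | h | h)
    · exact ⟨("stock", 1), by simp, rfl, h⟩
    · exact ⟨("share", 1), by simp, rfl, h⟩
    · exact ⟨("market", 1), by simp, rfl, h⟩
    · exact absurd h (by simp)
  · rintro ⟨p, hp, hpr, hin⟩
    rcases hp with rfl | rfl | rfl | rfl | rfl | rfl | rfl | rfl | rfl | rfl | rfl | rfl | rfl | rfl <;>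
      simp_all

theorem pv_c2 (s : String) :
    (["growth", "decline", "increase", "decrease"].any (fun w => PySem.Str.isIn w s)) = true
      ↔ pvG s.toList 2 := by
  simp only [pvG, pvKEYWORDS, List.any_cons, List.any_nil, Bool.or_eq_true, PySem.Str.isIn,
    List.mem_cons, List.not_mem_nil, or_false]
  constructor
  · rintro (h | h | h | h | h)
    · exact ⟨("growth", 2), by simp, rfl, h⟩
    · exact ⟨("decline", 2), by simp, rfl, h⟩
    · exact ⟨("increase", 2), by simp, rfl, h⟩
    · exact ⟨("decrease", 2), by simp, rfl, h⟩
    · exact absurd h (by simp)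
  · rintro ⟨p, hp, hpr, hin⟩
    rcases hp with rfl | rfl | rfl | rfl | rfl | rfl | rfl | rfl | rfl | rfl | rfl | rfl | rfl | rfl <;>
      simp_all

theorem pv_c3 (s : String) :
    (["quarter", "year", "month"].any (fun w => PySem.Str.isIn w s)) = true
      ↔ pvG s.toList 3 := by
  simp only [pvG, pvKEYWORDS, List.any_cons, List.any_nil, Bool.or_eq_true, PySem.Str.isIn,
    List.mem_cons, List.not_mem_nil, or_false]
  constructor
  · rintro (h | h | h | h)
    · exact ⟨("quarter", 3), by simp, rfl, h⟩
    · exact ⟨("year", 3), by simp, rfl, h⟩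
    · exact ⟨("month", 3), by simp, rfl, h⟩
    · exact absurd h (by simp)
  · rintro ⟨p, hp, hpr, hin⟩
    rcases hp with rfl | rfl | rfl | rfl | rfl | rfl | rfl | rfl | rfl | rfl | rfl | rfl | rfl | rfl <;>
      simp_all

-- ===== VERDICT (by name: the statement is the Claim_ definition above) =====
theorem categorize_phrase_py_spec : Claim_equal_categorize_phrase_py := by
  intro phrase _
  unfold Spec_categorize_phrase_py
  simp only [categorize_phrase_py, categorize_phrase_py_alt]
  set cs := (PySem.Str.lower phrase).toList with hcs
  set b := (List.range cs.length).foldl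
      (fun best i => if pvPriorityAt cs i < best then pvPriorityAt cs i else best) 4 with hb
  have t : ∀ j, j < 4 → (b ≤ j ↔ ∃ k ≤ j, pvG cs k) := fun j hj => pv_b_le cs j hj
  have h4 : b ≤ 4 := by
    rw [hb, pv_fold_le (fun i => pvPriorityAt cs i)]; exact Or.inl (le_refl 4)
  by_cases hc0 : (["earnings", "revenue", "profit", "loss"].any
      (fun w => PySem.Str.isIn w (PySem.Str.lower phrase))) = true
  · have g0 : pvG cs 0 := by rw [hcs]; exact (pv_c0 _).mp hc0
    have hbv : b = 0 := by have := (t 0 (by omega)).mpr ⟨0, le_refl 0, g0⟩; omega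
    rw [if_pos hc0, hbv]; decide
  have g0 : ¬ pvG cs 0 := fun g => hc0 ((pv_c0 _).mpr (by rw [hcs] at g; exact g))
  rw [if_neg hc0]
  by_cases hc1 : (["stock", "share", "market"].any
      (fun w => PySem.Str.isIn w (PySem.Str.lower phrase))) = true
  · have g1 : pvG cs 1 := by rw [hcs]; exact (pv_c1 _).mp hc1
    have hbv : b = 1 := by
      have hA := (t 1 (by omega)).mpr ⟨1, by omega, g1⟩
      have hB : ¬ b ≤ 0 := fun h => by
        rcases (t 0 (by omega)).mp h with ⟨k, hk, hg⟩
        interval_cases k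
        exact g0 hg
      omega
    rw [if_pos hc1, hbv]; decide
  have g1 : ¬ pvG cs 1 := fun g => hc1 ((pv_c1 _).mpr (by rw [hcs] at g; exact g))
  rw [if_neg hc1]
  by_cases hc2 : (["growth", "decline", "increase", "decrease"].any
      (fun w => PySem.Str.isIn w (PySem.Str.lower phrase))) = true
  · have g2 : pvG cs 2 := by rw [hcs]; exact (pv_c2 _).mp hc2
    have hbv : b = 2 := by
      have hA := (t 2 (by omega)).mpr ⟨2, by omega, g2⟩
      have hB : ¬ b ≤ 1 := fun h => by
        rcases (t 1 (by omega)).mp h with ⟨k, hk, hg⟩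
        interval_cases k
        · exact g0 hg
        · exact g1 hg
      omega
    rw [if_pos hc2, hbv]; decide
  have g2 : ¬ pvG cs 2 := fun g => hc2 ((pv_c2 _).mpr (by rw [hcs] at g; exact g))
  rw [if_neg hc2]
  by_cases hc3 : (["quarter", "year", "month"].any
      (fun w => PySem.Str.isIn w (PySem.Str.lower phrase))) = true
  · have g3 : pvG cs 3 := by rw [hcs]; exact (pv_c3 _).mp hc3
    have hbv : b = 3 := by
      have hA := (t 3 (by omega)).mpr ⟨3, by omega, g3⟩
      have hB : ¬ b ≤ 2 := fun h => by
        rcases (t 2 (by omega)).mp h with ⟨k, hk, hg⟩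
        interval_cases k
        · exact g0 hg
        · exact g1 hg
        · exact g2 hg
      omega
    rw [if_pos hc3, hbv]; decide
  have g3 : ¬ pvG cs 3 := fun g => hc3 ((pv_c3 _).mpr (by rw [hcs] at g; exact g))
  rw [if_neg hc3]
  have hbv : b = 4 := by
    have hB : ¬ b ≤ 3 := fun h => by
      rcases (t 3 (by omega)).mp h with ⟨k, hk, hg⟩
      interval_cases k
      · exact g0 hg
      · exact g1 hg
      · exact g2 hg
      · exact g3 hg
    omega
  rw [hbv]; decide
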